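-- pv_equiv track=rewrite | github.com/cdw0424/super-prompt | packages/core-py/super_prompt/mcp_register.py | _ensure_codex_web_search_enabled
-- ===== SOURCE A (Python) =====
-- def _ensure_codex_web_search_enabled(body: str) -> str:
--     lines = body.splitlines()
--     tools_idx = None
--     for idx, line in enumerate(lines):
--         if line.strip() == "[tools]":
--             tools_idx = idx
--             break
--
--     if tools_idx is None:
--         if lines and lines[-1].strip():
--             lines.append("")
--         lines.append("[tools]")
--         lines.append("web_search = true")
--     else:
--         end_idx = len(lines)
--         for i in range(tools_idx + 1, len(lines)):
--             stripped = lines[i].strip()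
--             if stripped.startswith("[") and stripped.endswith("]"):
--                 end_idx = i
--                 break
--
--         web_idx = None
--         for i in range(tools_idx + 1, end_idx):
--             stripped = lines[i].strip()
--             if stripped.startswith("web_search"):
--                 leading_ws = lines[i][: len(lines[i]) - len(lines[i].lstrip())]
--                 lines[i] = f"{leading_ws}web_search = true"
--                 web_idx = i
--                 break
--
--         if web_idx is None:
--             lines.insert(end_idx, "web_search = true")
--
--     body = "\n".join(lines)
--     if body and not body.endswith("\n"):
--         body += "\n"
--     return body
-- ===== SOURCE B (Python) =====
-- def _ensure_codex_web_search_enabled(body: str) -> str: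
--     # single pass over the lines with a small state machine
--     out = []
--     state = 0  # 0: [tools] not seen yet, 1: inside [tools], 2: web_search handled
--     for line in body.splitlines():
--         stripped = line.strip()
--         if state == 0:
--             if stripped == "[tools]":
--                 state = 1
--             out.append(line)
--         elif state == 1:
--             if stripped.startswith("[") and stripped.endswith("]"):
--                 out.append("web_search = true")
--                 out.append(line)
--                 state = 2
--             elif stripped.startswith("web_search"):
--                 leading_ws = line[: len(line) - len(line.lstrip())]
--                 out.append(f"{leading_ws}web_search = true")
--                 state = 2
--             else:
--                 out.append(line)
--         else:
--             out.append(line)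
--     if state == 0:
--         if out and out[-1].strip():
--             out.append("")
--         out.append("[tools]")
--         out.append("web_search = true")
--     elif state == 1:
--         out.append("web_search = true")
--     res = "\n".join(out)
--     if res and not res.endswith("\n"):
--         res += "\n"
--     return res
-- ===== Notes on version B (the rewrite author's own statement) =====
-- stated objective: alternative
-- what changed: Replaced A's three separate index-scans (find [tools], find section end, find/patch web_search) plus set/insert by a single left-to-right pass that copies lines while tracking a state flag (before [tools] / inside it / handled).
import Mathlib
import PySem

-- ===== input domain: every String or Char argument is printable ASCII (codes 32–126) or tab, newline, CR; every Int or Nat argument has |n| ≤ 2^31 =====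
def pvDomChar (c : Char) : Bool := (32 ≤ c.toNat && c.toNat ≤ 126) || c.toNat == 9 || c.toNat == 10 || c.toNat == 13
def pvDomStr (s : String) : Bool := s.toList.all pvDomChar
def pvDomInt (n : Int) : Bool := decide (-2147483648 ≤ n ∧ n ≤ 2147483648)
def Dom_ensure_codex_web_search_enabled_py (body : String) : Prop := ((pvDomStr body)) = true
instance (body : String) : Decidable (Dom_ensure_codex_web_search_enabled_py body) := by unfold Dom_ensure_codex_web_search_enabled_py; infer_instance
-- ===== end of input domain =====

-- B replaces A's three separate index-scans over the lines by one state-machine pass; alternative decomposition, same cost.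


-- shared line predicates / builders (identical expressions in BOTH Python sources)
def pvIsTools (s : String) : Bool := PySem.Str.strip s == "[tools]"
def pvIsHdr (s : String) : Bool :=
  PySem.Str.startswith (PySem.Str.strip s) "[" && PySem.Str.endswith (PySem.Str.strip s) "]"
def pvIsWeb (s : String) : Bool := PySem.Str.startswith (PySem.Str.strip s) "web_search"
-- leading_ws = line[: len(line) - len(line.lstrip())]; replaced line = leading_ws + "web_search = true"
def pvRepl (li : String) : String :=
  PySem.Str.slice li none (some ((PySem.Str.len li : Int) - (PySem.Str.len (PySem.Str.lstrip li) : Int)))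
    ++ "web_search = true"
-- the no-[tools] tail append (identical in both Pythons)
def pvTailTools (lines : List String) : List String :=
  (if lines ≠ [] ∧ PySem.Str.strip (PySem.List.pyGetD lines (-1) "") ≠ "" then lines ++ [""] else lines)
    ++ ["[tools]", "web_search = true"]
-- body = "\n".join(lines); trailing-newline fixup (identical in both Pythons)
def pvFinish (lines : List String) : String :=
  let res := PySem.Str.join "\n" lines
  if res ≠ "" ∧ ¬ (PySem.Str.endswith res "\n" = true) then res ++ "\n" else res

-- ===== PORT A =====
-- for idx, line in enumerate(lines): if line.strip() == "[tools]": tools_idx = idx; break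
def pvFindTools : List String → Nat → Option Nat
  | [], _ => none
  | l :: ls, i => if pvIsTools l then some i else pvFindTools ls (i + 1)
-- for i in range(tools_idx+1, len(lines)): … end_idx = i; break   (loop over lines[tools_idx+1:], index carried)
def pvFindEnd : List String → Nat → Option Nat
  | [], _ => none
  | l :: ls, i => if pvIsHdr l then some i else pvFindEnd ls (i + 1)
-- for i in range(tools_idx+1, end_idx): … web_idx = i; break
def pvFindWeb : List String → Nat → Nat → Option Nat
  | [], _, _ => none
  | l :: ls, i, e => if e ≤ i then none else if pvIsWeb l then some i else pvFindWeb ls (i + 1) e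

def ensure_codex_web_search_enabled_py (body : String) : String :=
  let lines := PySem.Str.splitlines body
  let lines2 :=
    match pvFindTools lines 0 with
    | none => pvTailTools lines
    | some ti =>
        let end_idx : Nat := (pvFindEnd (lines.drop (ti + 1)) (ti + 1)).getD lines.length
        match pvFindWeb (lines.drop (ti + 1)) (ti + 1) end_idx with
        | some wi => lines.set wi (pvRepl (PySem.List.pyGetD lines (wi : Int) ""))
        | none => PySem.List.insert lines (end_idx : Int) "web_search = true"
  pvFinish lines2

-- ===== PORT B =====
-- one pass: state 0 = before [tools], 1 = inside [tools], 2 = web_search handled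
def pvBStep : Nat × List String → String → Nat × List String
  | (st, out), line =>
    if st == 0 then
      if pvIsTools line then (1, out ++ [line]) else (0, out ++ [line])
    else if st == 1 then
      if pvIsHdr line then (2, out ++ ["web_search = true", line])
      else if pvIsWeb line then (2, out ++ [pvRepl line])
      else (1, out ++ [line])
    else (st, out ++ [line])

def ensure_codex_web_search_enabled_py_alt (body : String) : String :=
  let r := (PySem.Str.splitlines body).foldl pvBStep (0, [])
  let out :=
    if r.1 == 0 then pvTailTools r.2
    else if r.1 == 1 then r.2 ++ ["web_search = true"]
    else r.2
  pvFinish out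

-- ===== PRECONDITION & SPEC =====
def Spec_ensure_codex_web_search_enabled_py (body : String) (out : String) : Prop := out = ensure_codex_web_search_enabled_py_alt body
instance (body : String) (out : String) : Decidable (Spec_ensure_codex_web_search_enabled_py body out) := by unfold Spec_ensure_codex_web_search_enabled_py; infer_instance

-- ===== CLAIM (what is proved, stated in full; the proofs are below) =====
def Claim_equal_ensure_codex_web_search_enabled_py : Prop := ∀ (body : String), Dom_ensure_codex_web_search_enabled_py body → Spec_ensure_codex_web_search_enabled_py body (ensure_codex_web_search_enabled_py body)

-- ===== LEMMAS AND PROOFS =====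

-- the section rewrite both programs perform on the lines after the first [tools]
def pvFix : List String → List String
  | [] => ["web_search = true"]
  | r :: rs =>
      if pvIsHdr r then "web_search = true" :: r :: rs
      else if pvIsWeb r then pvRepl r :: rs
      else r :: pvFix rs

theorem pvFold2 (R : List String) (acc : List String) :
    R.foldl pvBStep (2, acc) = (2, acc ++ R) := by
  induction R generalizing acc with
  | nil => simp
  | cons r rs ih => simp [pvBStep, ih]

-- state-1 fold: output (with the trailing append when still unhandled) is acc ++ pvFix R
theorem pvFold1_spec (R : List String) (acc : List String) :
    (let p := R.foldl pvBStep (1, acc)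
     (if p.1 == 1 then p.2 ++ ["web_search = true"] else p.2) = acc ++ pvFix R) := by
  induction R generalizing acc with
  | nil => simp [pvFix]
  | cons r rs ih =>
    by_cases h1 : pvIsHdr r = true
    · simp [pvBStep, h1, pvFix, pvFold2]
    · by_cases h2 : pvIsWeb r = true
      · simp [pvBStep, h1, h2, pvFix, pvFold2]
      · simpa [pvBStep, h1, h2, pvFix] using ih (acc ++ [r])

theorem pvFold0_clean (L : List String) (acc : List String)
    (h : ∀ l ∈ L, pvIsTools l = false) :
    L.foldl pvBStep (0, acc) = (0, acc ++ L) := by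
  induction L generalizing acc with
  | nil => simp
  | cons l ls ih =>
    have hl := h l (by simp)
    simp only [List.foldl_cons, pvBStep, hl]
    simpa using ih (acc ++ [l]) (fun x hx => h x (by simp [hx]))

theorem pvFindTools_none (L : List String) (n : Nat) :
    pvFindTools L n = none ↔ ∀ l ∈ L, pvIsTools l = false := by
  induction L generalizing n with
  | nil => simp [pvFindTools]
  | cons l ls ih =>
    by_cases h : pvIsTools l = true
    · simp [pvFindTools, h]
    · simp only [Bool.not_eq_true] at h
      simp [pvFindTools, h, ih]

theorem pvFindTools_some (L : List String) (n i : Nat)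
    (h : pvFindTools L n = some i) :
    ∃ P t R, L = P ++ t :: R ∧ n + P.length = i ∧
      (∀ p ∈ P, pvIsTools p = false) ∧ pvIsTools t = true := by
  induction L generalizing n with
  | nil => simp [pvFindTools] at h
  | cons l ls ih =>
    by_cases hl : pvIsTools l = true
    · have hni : n = i := by simpa [pvFindTools, hl] using h
      exact ⟨[], l, ls, by simp, by simp [hni], by simp, hl⟩
    · simp only [Bool.not_eq_true] at hl
      simp only [pvFindTools, hl, Bool.false_eq_true, if_false] at h
      obtain ⟨P, t, R, hL, hn, hP, ht⟩ := ih (n + 1) h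
      refine ⟨l :: P, t, R, by simp [hL], by simp; omega, ?_, ht⟩
      intro p hp
      rcases List.mem_cons.mp hp with rfl | hp
      · exact hl
      · exact hP p hp

theorem pvFindEnd_ge (R : List String) (n j : Nat) (h : pvFindEnd R n = some j) : n ≤ j := by
  induction R generalizing n with
  | nil => simp [pvFindEnd] at h
  | cons r rs ih =>
    by_cases hr : pvIsHdr r = true
    · have : n = j := by simpa [pvFindEnd, hr] using h
      omega
    · simp only [Bool.not_eq_true] at hr
      simp only [pvFindEnd, hr, Bool.false_eq_true, if_false] at h
      have := ih (n + 1) h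
      omega

theorem pvSetAppend (P : List String) (x v : String) (xs : List String) :
    (P ++ x :: xs).set P.length v = P ++ v :: xs := by
  induction P with
  | nil => simp
  | cons p ps ih => simp [ih]

theorem pvGetDAppend (P : List String) (x : String) (xs : List String) :
    PySem.List.pyGetD (P ++ x :: xs) ((P.length : Nat) : Int) "" = x := by
  rw [PySem.List.pyGetD_natCast]
  simp [List.getD_eq_getElem?_getD]

-- A's else branch, computed from the suffix R after the [tools] line and its start index
theorem pvAelse (R P : List String) :
    (match pvFindWeb R P.length ((pvFindEnd R P.length).getD (P.length + R.length)) with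
      | some wi => (P ++ R).set wi (pvRepl (PySem.List.pyGetD (P ++ R) (wi : Int) ""))
      | none => PySem.List.insert (P ++ R)
          ((((pvFindEnd R P.length).getD (P.length + R.length) : Nat) : Int)) "web_search = true")
    = P ++ pvFix R := by
  induction R generalizing P with
  | nil =>
    simp only [pvFindEnd, pvFindWeb, Option.getD_none, List.length_nil, Nat.add_zero,
      List.append_nil, pvFix]
    rw [PySem.List.insert_natCast _ _ _ (le_refl _)]
    simp
  | cons r rs ih =>
    by_cases hr : pvIsHdr r = true
    · simp only [pvFindEnd, pvFindWeb, hr, if_true, Option.getD_some, le_refl, pvFix]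
      rw [PySem.List.insert_natCast _ _ _ (by simp)]
      rw [List.take_left' rfl, List.drop_left' rfl]
    · simp only [Bool.not_eq_true] at hr
      have hEnd : pvFindEnd (r :: rs) P.length = pvFindEnd rs (P.length + 1) := by
        simp [pvFindEnd, hr]
      rw [hEnd]
      set e := (pvFindEnd rs (P.length + 1)).getD (P.length + (r :: rs).length) with he
      have hge : P.length + 1 ≤ e := by
        cases hfe : pvFindEnd rs (P.length + 1) with
        | none => rw [he, hfe]; simp
        | some j =>
          have := pvFindEnd_ge rs (P.length + 1) j hfe
          rw [he, hfe]; simpa using this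
      by_cases hw : pvIsWeb r = true
      · have hwfind : pvFindWeb (r :: rs) P.length e = some P.length := by
          simp only [pvFindWeb]
          rw [if_neg (by omega), if_pos hw]
        rw [hwfind]
        simp only []
        rw [pvGetDAppend, pvSetAppend]
        simp [pvFix, hr, hw]
      · simp only [Bool.not_eq_true] at hw
        have hwfind : pvFindWeb (r :: rs) P.length e = pvFindWeb rs (P.length + 1) e := by
          simp only [pvFindWeb]
          rw [if_neg (by omega), hw]
          simp
        rw [hwfind]
        have key := ih (P ++ [r])
        rw [show (P ++ [r]).length = P.length + 1 by simp] at key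
        rw [show P.length + 1 + rs.length = P.length + (r :: rs).length by simp only [List.length_cons]; omega] at key
        rw [← he] at key
        rw [List.append_cons]
        rw [key]
        simp [pvFix, hr, hw]

theorem pvFold1_state (R : List String) (acc : List String) :
    (R.foldl pvBStep (1, acc)).1 = 1 ∨ (R.foldl pvBStep (1, acc)).1 = 2 := by
  induction R generalizing acc with
  | nil => simp
  | cons r rs ih =>
    by_cases h1 : pvIsHdr r = true
    · simp [pvBStep, h1, pvFold2]
    · by_cases h2 : pvIsWeb r = true
      · simp [pvBStep, h1, h2, pvFold2]
      · simpa [pvBStep, h1, h2] using ih (acc ++ [r])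

-- ===== VERDICT (by name: the statement is the Claim_ definition above) =====
theorem ensure_codex_web_search_enabled_py_spec : Claim_equal_ensure_codex_web_search_enabled_py := by
  intro body _
  unfold Spec_ensure_codex_web_search_enabled_py
  unfold ensure_codex_web_search_enabled_py ensure_codex_web_search_enabled_py_alt
  set L := PySem.Str.splitlines body with hL
  cases h : pvFindTools L 0 with
  | none =>
    have hclean := (pvFindTools_none L 0).mp h
    simp only [h, pvFold0_clean L [] hclean]
    simp
  | some ti =>
    obtain ⟨P, t, R, hdec, hn, hP, ht⟩ := pvFindTools_some L 0 ti h
    simp only [Nat.zero_add] at hn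
    have hsplit : L = (P ++ [t]) ++ R := by rw [hdec]; simp
    have hfold : L.foldl pvBStep (0, []) = R.foldl pvBStep (1, P ++ [t]) := by
      rw [hsplit, List.foldl_append, List.foldl_append, pvFold0_clean P [] hP]
      simp [pvBStep, ht]
    have hdrop : L.drop (ti + 1) = R := by
      rw [hsplit, ← hn, show P.length + 1 = (P ++ [t]).length by simp, List.drop_left]
    have hlen : L.length = (P ++ [t]).length + R.length := by rw [hsplit]; simp; omega
    have hidx : ti + 1 = (P ++ [t]).length := by simp [← hn]
    have hA := pvAelse R (P ++ [t])
    rw [← hsplit] at hA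
    simp only [h]
    rw [hdrop, hlen, hidx, hA, hfold]
    rcases pvFold1_state R (P ++ [t]) with h1 | h1 <;>
    · have hsp := pvFold1_spec R (P ++ [t])
      simp only [h1] at hsp ⊢
      norm_num at hsp ⊢
      rw [hsp]
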